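-- pv_equiv track=rewrite | github.com/CodeHarryson/community-resource-sharing-platform | docs/portfolio_to_pdf.py | split_into_blocks
-- ===== SOURCE A (Python) =====
-- def split_into_blocks(md):
--     """Split markdown into blocks (code vs text)."""
--     parts = []
--     current = []
--     in_code = False
--
--     for line in md.split('\n'):
--         if line.startswith('```'):
--             if in_code:
--                 parts.append(('code', '\n'.join(current)))
--                 current = []
--             else:
--                 if current:
--                     parts.append(('text', '\n'.join(current)))
--                 current = []
--             in_code = not in_code
--             continue
--         current.append(line)
--
--     if current:
--         parts.append(('text' if not in_code else 'code', '\n'.join(current)))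
--
--     return parts
-- ===== SOURCE B (Python) =====
-- def split_into_blocks(md):
--     """Split markdown into blocks (code vs text)."""
--     # Pass 1: cut the lines into segments at fence lines (no state toggle).
--     done = []
--     cur = []
--     for line in md.split('\n'):
--         if line.startswith('```'):
--             done.append(cur)
--             cur = []
--         else:
--             cur.append(line)
--     segs = done + [cur]
--     # Pass 2: classify by parity; interior code segments are kept even when empty.
--     last = len(segs) - 1
--     parts = []
--     for i, seg in enumerate(segs):
--         if seg or (i % 2 == 1 and i != last):
--             parts.append(('code' if i % 2 == 1 else 'text', '\n'.join(seg)))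
--     return parts
-- ===== Notes on version B (the rewrite author's own statement) =====
-- stated objective: alternative
-- what changed: Replaces A's in_code boolean toggle with inline conditional emission by a two-pass decomposition: first cut the lines into segments at fence lines, then classify segments by index parity (even=text, odd=code) and emit non-empty segments plus empty interior code segments.
import Mathlib
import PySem

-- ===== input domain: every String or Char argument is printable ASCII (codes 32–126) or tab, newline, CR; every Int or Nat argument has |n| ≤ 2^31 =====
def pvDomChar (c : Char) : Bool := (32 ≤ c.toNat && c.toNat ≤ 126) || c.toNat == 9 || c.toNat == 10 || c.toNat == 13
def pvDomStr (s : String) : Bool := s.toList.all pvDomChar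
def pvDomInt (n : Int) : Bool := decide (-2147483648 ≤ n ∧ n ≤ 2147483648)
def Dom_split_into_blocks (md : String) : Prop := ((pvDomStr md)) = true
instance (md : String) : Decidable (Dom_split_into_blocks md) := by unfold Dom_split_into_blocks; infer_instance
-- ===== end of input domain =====

-- B replaces A's in_code toggle with a fence-cut segment list classified by index parity (objective: alternative decomposition, same cost).

-- ===== PORT A =====
-- md.split('\n'): "\n" is a non-empty literal separator, so Str.split? is always `some`; .getD [] is unreachable
def pvLines (md : String) : List String := (PySem.Str.split? md "\n").getD []

-- loop body of A: state = (parts, current, in_code)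
def pvStepA (st : List (String × String) × List String × Bool) (line : String) :
    List (String × String) × List String × Bool :=
  if PySem.Str.startswith line "```" then
    if st.2.2 then
      (st.1 ++ [("code", PySem.Str.join "\n" st.2.1)], [], !st.2.2)
    else
      ((if st.2.1 ≠ [] then st.1 ++ [("text", PySem.Str.join "\n" st.2.1)] else st.1), [], !st.2.2)
  else
    (st.1, st.2.1 ++ [line], st.2.2)

-- A's trailing 'if current: parts.append(...)'
def pvFinA (st : List (String × String) × List String × Bool) : List (String × String) :=
  if st.2.1 ≠ [] then
    st.1 ++ [((if !st.2.2 then "text" else "code"), PySem.Str.join "\n" st.2.1)]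
  else st.1

def split_into_blocks (md : String) : List (String × String) :=
  pvFinA ((pvLines md).foldl pvStepA ([], [], false))

-- ===== PORT B =====
-- pass 1 body: state = (done, cur); a fence line closes the current segment
def pvStepB (st : List (List String) × List String) (line : String) :
    List (List String) × List String :=
  if PySem.Str.startswith line "```" then (st.1 ++ [st.2], []) else (st.1, st.2 ++ [line])

-- pass 2 body, with the fixed index of the last segment
def pvEmitB (last : Int) (parts : List (String × String)) (iseg : Int × List String) :
    List (String × String) :=
  if iseg.2 ≠ [] ∨ (iseg.1 % 2 = 1 ∧ iseg.1 ≠ last) then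
    parts ++ [((if iseg.1 % 2 = 1 then "code" else "text"), PySem.Str.join "\n" iseg.2)]
  else parts

def split_into_blocks_alt (md : String) : List (String × String) :=
  let p := (pvLines md).foldl pvStepB ([], [])
  let segs := p.1 ++ [p.2]
  let last : Int := (segs.length : Int) - 1
  (PySem.List.enumerate segs 0).foldl (pvEmitB last) []

-- ===== PRECONDITION & SPEC =====
def Spec_split_into_blocks (md : String) (out : List (String × String)) : Prop := out = split_into_blocks_alt md
instance (md : String) (out : List (String × String)) : Decidable (Spec_split_into_blocks md out) := by unfold Spec_split_into_blocks; infer_instance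

-- ===== CLAIM (what is proved, stated in full; the proofs are below) =====
def Claim_equal_split_into_blocks : Prop := ∀ (md : String), Dom_split_into_blocks md → Spec_split_into_blocks md (split_into_blocks md)

-- ===== LEMMAS AND PROOFS =====

-- the segment list the fence lines cut `lines` into, the current segment being `cur`
def pvSegsFrom (cur : List String) : List String → List (List String)
  | [] => [cur]
  | l :: ls =>
    if PySem.Str.startswith l "```" then cur :: pvSegsFrom [] ls else pvSegsFrom (cur ++ [l]) ls

-- the common rendering: segment at index k is emitted iff non-empty, or odd (code) and interior
def pvRender (k : Nat) : List (List String) → List (String × String)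
  | [] => []
  | seg :: rest =>
    (if seg ≠ [] ∨ (k % 2 = 1 ∧ rest ≠ []) then
      [((if k % 2 = 1 then "code" else "text"), PySem.Str.join "\n" seg)]
     else []) ++ pvRender (k + 1) rest

theorem pvSegsFrom_ne_nil : ∀ (ls : List String) (cur : List String), pvSegsFrom cur ls ≠ []
  | [], cur => by simp [pvSegsFrom]
  | l :: ls, cur => by
    simp only [pvSegsFrom]
    by_cases hf : PySem.Str.startswith l "```" = true
    · rw [if_pos hf]; simp
    · rw [if_neg hf]; exact pvSegsFrom_ne_nil ls _

theorem pvA_render (lines : List String) : ∀ (parts : List (String × String)) (cur : List String) (k : Nat),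
    pvFinA (lines.foldl pvStepA (parts, cur, (k % 2 == 1))) = parts ++ pvRender k (pvSegsFrom cur lines) := by
  induction lines with
  | nil =>
    intro parts cur k
    simp only [List.foldl_nil, pvFinA, pvSegsFrom, pvRender]
    rcases Nat.mod_two_eq_zero_or_one k with h | h <;>
      by_cases hc : cur = [] <;> simp [h, hc]
  | cons l ls ih =>
    intro parts cur k
    by_cases hf : PySem.Str.startswith l "```" = true
    · rcases Nat.mod_two_eq_zero_or_one k with h | h
      · have h1 : (k + 1) % 2 = 1 := by omega
        simp only [List.foldl_cons, pvStepA]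
        rw [if_pos hf, show (k % 2 == 1) = false by simp [h]]
        simp only [Bool.false_eq_true, if_false, Bool.not_false]
        have := ih (if cur ≠ [] then parts ++ [("text", PySem.Str.join "\n" cur)] else parts) [] (k + 1)
        rw [show ((k + 1) % 2 == 1) = true by simp [h1]] at this
        rw [this]
        rw [pvSegsFrom, if_pos hf]
        simp only [pvRender, h]
        by_cases hc : cur = [] <;> simp [hc]
      · have h1 : (k + 1) % 2 = 0 := by omega
        simp only [List.foldl_cons, pvStepA]
        rw [if_pos hf, show (k % 2 == 1) = true by simp [h]]
        simp only [if_true, Bool.not_true]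
        have := ih (parts ++ [("code", PySem.Str.join "\n" cur)]) [] (k + 1)
        rw [show ((k + 1) % 2 == 1) = false by simp [h1]] at this
        rw [this]
        rw [pvSegsFrom, if_pos hf]
        simp [pvRender, h, pvSegsFrom_ne_nil]
    · simp only [List.foldl_cons, pvStepA]
      rw [if_neg hf, pvSegsFrom, if_neg hf]
      exact ih parts (cur ++ [l]) k

theorem pvB_segs (lines : List String) : ∀ (done : List (List String)) (cur : List String),
    (lines.foldl pvStepB (done, cur)).1 ++ [(lines.foldl pvStepB (done, cur)).2]
      = done ++ pvSegsFrom cur lines := by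
  induction lines with
  | nil => intro done cur; simp [pvSegsFrom]
  | cons l ls ih =>
    intro done cur
    by_cases hf : PySem.Str.startswith l "```" = true
    · simp only [List.foldl_cons, pvStepB]
      rw [if_pos hf, pvSegsFrom, if_pos hf, ih (done ++ [cur]) []]
      simp
    · simp only [List.foldl_cons, pvStepB]
      rw [if_neg hf, pvSegsFrom, if_neg hf]
      exact ih done (cur ++ [l])

theorem pvB_render (segs : List (List String)) : ∀ (k : Nat) (L : Int) (acc : List (String × String)),
    (k : Int) + segs.length = L + 1 →
    (PySem.List.enumerate segs (k : Int)).foldl (pvEmitB L) acc = acc ++ pvRender k segs := by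
  induction segs with
  | nil => intro k L acc _; simp [pvRender, PySem.List.enumerate_nil]
  | cons seg rest ih =>
    intro k L acc hL
    rw [PySem.List.enumerate_cons, List.foldl_cons]
    have hmod : ((k : Int) % 2 = 1) ↔ (k % 2 = 1) := by omega
    have hlast : ((k : Int) ≠ L) ↔ rest ≠ [] := by
      constructor
      · intro h hr; subst hr; simp at hL; omega
      · intro h he
        have : rest.length ≠ 0 := by simpa using h
        simp at hL; omega
    have hstep : pvEmitB L acc ((k : Int), seg)
        = acc ++ (if seg ≠ [] ∨ (k % 2 = 1 ∧ rest ≠ []) then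
            [((if k % 2 = 1 then "code" else "text"), PySem.Str.join "\n" seg)] else []) := by
      simp only [pvEmitB]
      by_cases hk : k % 2 = 1
      · by_cases hr : rest ≠ [] <;> by_cases hs : seg ≠ [] <;>
          simp [hk, hmod.mpr hk, hlast, hr, hs]
      · have hm : ¬ ((k : Int) % 2 = 1) := fun h => hk (hmod.mp h)
        by_cases hs : seg ≠ [] <;> simp [hk, hm, hs]
    rw [hstep]
    have := ih (k + 1) L (acc ++ (if seg ≠ [] ∨ (k % 2 = 1 ∧ rest ≠ []) then
      [((if k % 2 = 1 then "code" else "text"), PySem.Str.join "\n" seg)] else [])) (by simp only [List.length_cons] at hL; push_cast at hL ⊢; omega)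
    push_cast at this
    rw [this]
    simp [pvRender, List.append_assoc]

theorem pvAB (md : String) : split_into_blocks md = split_into_blocks_alt md := by
  have hsegs := pvB_segs (pvLines md) [] []
  simp only [List.nil_append] at hsegs
  have hB := pvB_render (pvSegsFrom [] (pvLines md)) 0
      (((pvSegsFrom [] (pvLines md)).length : Int) - 1) [] (by push_cast; ring)
  simp only [Nat.cast_zero, List.nil_append] at hB
  have hA := pvA_render (pvLines md) [] [] 0
  rw [show ((0 : Nat) % 2 == 1) = false from rfl] at hA
  simp only [List.nil_append] at hA
  simp only [split_into_blocks, split_into_blocks_alt, hsegs]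
  rw [hA, hB]

-- ===== VERDICT (by name: the statement is the Claim_ definition above) =====
theorem split_into_blocks_spec : Claim_equal_split_into_blocks := by
  intro md _
  unfold Spec_split_into_blocks
  exact pvAB md
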